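-- pv_equiv track=rewrite | github.com/221sakshisharma/Lumeris | backend/app/services/rag_service.py | _novel_suffix
-- ===== SOURCE A (Python) =====
-- def _novel_suffix(existing: str, incoming: str) -> str:
--     if not incoming:
--         return ""
--     if not existing:
--         return incoming
--     if incoming in existing or existing.endswith(incoming):
--         return ""
--     if incoming.startswith(existing):
--         return incoming[len(existing):]
--
--     max_overlap = min(len(existing), len(incoming))
--     for overlap in range(max_overlap, 0, -1):
--         if existing.endswith(incoming[:overlap]):
--             return incoming[overlap:]
--
--     return incoming
-- ===== SOURCE B (Python) =====
-- def _kmp_step(pat, fail, k, c):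
--     while k > 0 and pat[k] != c:
--         k = fail[k - 1]
--     if pat[k] == c:
--         k += 1
--     return k
--
--
-- def _novel_suffix(existing: str, incoming: str) -> str:
--     # KMP: one left-to-right scan of `existing` with pattern `incoming`.
--     # The automaton state after the scan is the length of the longest prefix
--     # of `incoming` that is a suffix of `existing`; hitting a full match
--     # anywhere means `incoming` already occurs in `existing`.
--     if not incoming:
--         return ""
--     m = len(incoming)
--     fail = [0] * m
--     k = 0
--     for i in range(1, m):
--         k = _kmp_step(incoming, fail, k, incoming[i])
--         fail[i] = k
--     state = 0
--     for c in existing: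
--         state = _kmp_step(incoming, fail, state, c)
--         if state == m:
--             return ""
--     return incoming[state:]
-- ===== Notes on version B (the rewrite author's own statement) =====
-- stated objective: faster
-- what changed: Replaces A's special-case chain plus descending endswith scan (worst-case quadratic) by a single Knuth-Morris-Pratt scan of `existing` with pattern `incoming`: the failure table is built once and the final automaton state is the longest prefix of `incoming` that is a suffix of `existing`, with a full match during the scan covering A's substring/endswith cases.
import Mathlib
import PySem

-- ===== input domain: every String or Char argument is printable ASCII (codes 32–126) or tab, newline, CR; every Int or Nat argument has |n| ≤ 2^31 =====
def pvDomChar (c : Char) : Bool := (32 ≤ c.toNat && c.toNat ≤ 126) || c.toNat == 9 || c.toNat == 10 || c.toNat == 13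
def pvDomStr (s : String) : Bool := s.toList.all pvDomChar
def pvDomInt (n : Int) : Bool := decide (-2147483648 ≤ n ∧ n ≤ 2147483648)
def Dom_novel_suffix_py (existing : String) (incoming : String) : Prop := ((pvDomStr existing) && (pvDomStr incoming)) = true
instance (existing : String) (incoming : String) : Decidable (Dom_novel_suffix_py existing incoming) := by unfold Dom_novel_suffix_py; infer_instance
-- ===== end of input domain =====

-- B replaces A's quadratic descending overlap scan (plus substring / endswith /
-- startswith special cases) by a single linear KMP scan of `existing` with
-- pattern `incoming`; return values are proved identical on all inputs.

-- ===== PORT A =====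
-- the `for overlap in range(max_overlap, 0, -1)` loop: counts down, first hit returns incoming[overlap:]
def pvALoop (existing incoming : String) : Nat → String
  | 0 => incoming
  | n+1 =>
    if PySem.Str.endswith existing (PySem.Str.slice incoming none (some ((n+1 : Nat) : Int))) = true
    then PySem.Str.slice incoming (some ((n+1 : Nat) : Int)) none
    else pvALoop existing incoming n

def novel_suffix_py (existing : String) (incoming : String) : String :=
  if PySem.Str.len incoming = 0 then "" else
  if PySem.Str.len existing = 0 then incoming else
  if PySem.Str.isIn incoming existing || PySem.Str.endswith existing incoming then "" else
  if PySem.Str.startswith incoming existing then PySem.Str.slice incoming (some (PySem.Str.len existing)) none else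
  pvALoop existing incoming ((min (PySem.Str.len existing) (PySem.Str.len incoming)).toNat)

-- ===== PORT B =====
-- `_kmp_step`: the while-loop walks the failure chain; fuel = k bounds its
-- iterations (each failure entry is < its index, so the chain strictly descends)
def pvShift (p : List Char) (fail : List Nat) (c : Char) : Nat → Nat → Nat
  | k, 0 => k
  | k, fuel+1 =>
    if 0 < k ∧ p.getD k ' ' ≠ c then pvShift p fail c (fail.getD (k-1) 0) fuel else k

def pvStep (p : List Char) (fail : List Nat) (k : Nat) (c : Char) : Nat :=
  let k' := pvShift p fail c k k
  if p.getD k' ' ' = c then k' + 1 else k'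

-- `for i in range(1, m)` building `fail`; Python preallocates [0]*m and writes
-- index i each round — built here by appending (index 0 keeps its initial 0)
def pvFailLoop (p : List Char) (fail : List Nat) (k i : Nat) : List Nat :=
  if h : i < p.length then
    let k' := pvStep p fail k (p.getD i ' ')
    pvFailLoop p (fail ++ [k']) k' (i+1)
  else fail
termination_by p.length - i

-- `for c in existing`: none = early `return ""` on a full match
def pvScanLoop (p : List Char) (fail : List Nat) : Nat → List Char → Option Nat
  | state, [] => some state
  | state, c :: rest =>
    let s := pvStep p fail state c
    if s = p.length then none else pvScanLoop p fail s rest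

def novel_suffix_py_alt (existing : String) (incoming : String) : String :=
  if PySem.Str.len incoming = 0 then "" else
  let p := incoming.toList
  let fail := pvFailLoop p [0] 0 1
  match pvScanLoop p fail 0 existing.toList with
  | none => ""
  | some st => PySem.Str.slice incoming (some ((st : Nat) : Int)) none

-- ===== PRECONDITION & SPEC =====
def Spec_novel_suffix_py (existing : String) (incoming : String) (out : String) : Prop := out = novel_suffix_py_alt existing incoming
instance (existing : String) (incoming : String) (out : String) : Decidable (Spec_novel_suffix_py existing incoming out) := by unfold Spec_novel_suffix_py; infer_instance

-- ===== CLAIM (what is proved, stated in full; the proofs are below) =====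
def Claim_equal_novel_suffix_py : Prop := ∀ (existing : String) (incoming : String), Dom_novel_suffix_py existing incoming → Spec_novel_suffix_py existing incoming (novel_suffix_py existing incoming)

-- ===== LEMMAS AND PROOFS =====

-- G p t: length of the longest prefix of p that is a suffix of t
def pvG (p t : List Char) : Nat := Nat.findGreatest (fun j => p.take j <:+ t) p.length
-- longest proper border of p.take n
def pvBrd (p : List Char) (n : Nat) : Nat := Nat.findGreatest (fun j => p.take j <:+ p.take n) (n-1)
-- the common value of both programs, on the list side
def pvSpec (p t : List Char) : List Char :=
  if p = [] then [] else if p <:+: t then [] else p.drop (pvG p t)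

theorem pvG_le (p t : List Char) : pvG p t ≤ p.length := Nat.findGreatest_le _
theorem pvG_suffix (p t : List Char) : p.take (pvG p t) <:+ t := by
  have h := Nat.findGreatest_spec (P := fun j => p.take j <:+ t) (Nat.zero_le p.length)
    (by simp)
  exact h
theorem pvG_max (p t : List Char) {j : Nat} (hj : j ≤ p.length) (h : p.take j <:+ t) : j ≤ pvG p t :=
  Nat.le_findGreatest hj h
theorem pvG_le_len (p t : List Char) : pvG p t ≤ t.length := by
  have h := (pvG_suffix p t).length_le
  have h2 : (p.take (pvG p t)).length = pvG p t := by
    simp [List.length_take]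
    exact pvG_le p t
  omega

theorem pvBrd_le (p : List Char) (n : Nat) : pvBrd p n ≤ n - 1 := Nat.findGreatest_le _
theorem pvBrd_suffix (p : List Char) (n : Nat) : p.take (pvBrd p n) <:+ p.take n := by
  have h := Nat.findGreatest_spec (P := fun j => p.take j <:+ p.take n) (Nat.zero_le (n-1))
    (by simp)
  exact h
theorem pvBrd_max (p : List Char) {n j : Nat} (hj : j ≤ n - 1) (h : p.take j <:+ p.take n) : j ≤ pvBrd p n :=
  Nat.le_findGreatest hj h

-- suffix of a one-char extension
theorem pvConcat_suffix_concat (l t : List Char) (a c : Char) :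
    (l ++ [a] <:+ t ++ [c]) ↔ (a = c ∧ l <:+ t) := by
  rw [← List.reverse_prefix]
  simp only [List.reverse_append, List.reverse_cons, List.reverse_nil, List.nil_append,
    List.singleton_append]
  rw [List.cons_prefix_cons, List.reverse_prefix]

theorem pvTake_succ_concat (p : List Char) (j : Nat) (hj : j < p.length) :
    p.take (j+1) = p.take j ++ [p.getD j ' '] := by
  rw [List.take_add_one]
  simp [List.getElem?_eq_getElem hj]

theorem pvTake_suffix_concat_iff (p t : List Char) (c : Char) (j : Nat) (hj : j < p.length) :
    (p.take (j+1) <:+ t ++ [c]) ↔ (p.take j <:+ t ∧ p.getD j ' ' = c) := by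
  rw [pvTake_succ_concat p j hj, pvConcat_suffix_concat]
  tauto

theorem pvTake_suffix_take {p t : List Char} {j k : Nat} (hjk : j ≤ k) (_hk : k ≤ p.length)
    (h1 : p.take j <:+ t) (h2 : p.take k <:+ t) : p.take j <:+ p.take k :=
  List.suffix_of_suffix_length_le h1 h2 (by simp [List.length_take]; omega)

theorem pvShift_zero (p : List Char) (fail : List Nat) (c : Char) :
    ∀ f, pvShift p fail c 0 f = 0 := by
  intro f
  cases f with
  | zero => rfl
  | succ f => simp [pvShift]

-- the fuel argument is irrelevant as soon as it is ≥ the state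
theorem pvShift_fuel (p : List Char) (fail : List Nat) (c : Char) :
    ∀ k f1 f2, k ≤ f1 → k ≤ f2 → (∀ j, j < k → fail.getD j 0 ≤ j) →
      pvShift p fail c k f1 = pvShift p fail c k f2 := by
  intro k
  induction k using Nat.strong_induction_on with
  | _ k ih =>
    intro f1 f2 h1 h2 hb
    cases k with
    | zero => rw [pvShift_zero, pvShift_zero]
    | succ k' =>
      obtain ⟨f1', rfl⟩ : ∃ m, f1 = m + 1 := ⟨f1 - 1, by omega⟩
      obtain ⟨f2', rfl⟩ : ∃ m, f2 = m + 1 := ⟨f2 - 1, by omega⟩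
      rw [pvShift, pvShift]
      split_ifs with h
      · have hble : fail.getD (k'+1-1) 0 ≤ k' := by simpa using hb k' (by omega)
        exact ih (fail.getD (k'+1-1) 0) (by omega) f1' f2' (by omega) (by omega)
          (fun j hj => hb j (by omega))
      · rfl

-- a maximal-overlap transition only depends on the matched prefix
theorem pvG_concat (p t : List Char) (c : Char) :
    pvG p (t ++ [c]) = pvG p (p.take (pvG p t) ++ [c]) := by
  apply le_antisymm
  · rcases Nat.eq_zero_or_pos (pvG p (t ++ [c])) with h0 | hpos
    · omega
    · obtain ⟨j, hj⟩ : ∃ j, pvG p (t ++ [c]) = j + 1 := ⟨pvG p (t ++ [c]) - 1, by omega⟩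
      have hle : j + 1 ≤ p.length := hj ▸ pvG_le p (t ++ [c])
      have hsfx := pvG_suffix p (t ++ [c])
      rw [hj, pvTake_suffix_concat_iff p t c j (by omega)] at hsfx
      obtain ⟨h1, h2⟩ := hsfx
      have hjk : j ≤ pvG p t := pvG_max p t (by omega) h1
      have h3 : p.take j <:+ p.take (pvG p t) :=
        pvTake_suffix_take hjk (pvG_le p t) h1 (pvG_suffix p t)
      have h4 : p.take (j+1) <:+ p.take (pvG p t) ++ [c] := by
        rw [pvTake_suffix_concat_iff p _ c j (by omega)]
        exact ⟨h3, h2⟩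
      rw [hj]
      exact pvG_max p _ hle h4
  · rcases Nat.eq_zero_or_pos (pvG p (p.take (pvG p t) ++ [c])) with h0 | hpos
    · omega
    · obtain ⟨j, hj⟩ : ∃ j, pvG p (p.take (pvG p t) ++ [c]) = j + 1 := ⟨pvG p (p.take (pvG p t) ++ [c]) - 1, by omega⟩
      have hle : j + 1 ≤ p.length := hj ▸ pvG_le p _
      have hsfx := pvG_suffix p (p.take (pvG p t) ++ [c])
      rw [hj, pvTake_suffix_concat_iff p _ c j (by omega)] at hsfx
      obtain ⟨h1, h2⟩ := hsfx
      have h3 : p.take j <:+ t := h1.trans (pvG_suffix p t)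
      have h4 : p.take (j+1) <:+ t ++ [c] := by
        rw [pvTake_suffix_concat_iff p t c j (by omega)]
        exact ⟨h3, h2⟩
      rw [hj]
      exact pvG_max p _ hle h4

-- on a mismatch the transition may restart from the longest proper border
theorem pvG_concat_brd (p : List Char) (c : Char) (k : Nat) (hk : k < p.length)
    (hc : p.getD k ' ' ≠ c) :
    pvG p (p.take k ++ [c]) = pvG p (p.take (pvBrd p k) ++ [c]) := by
  apply le_antisymm
  · rcases Nat.eq_zero_or_pos (pvG p (p.take k ++ [c])) with h0 | hpos
    · omega
    · obtain ⟨j, hj⟩ : ∃ j, pvG p (p.take k ++ [c]) = j + 1 := ⟨pvG p (p.take k ++ [c]) - 1, by omega⟩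
      have hle : j + 1 ≤ p.length := hj ▸ pvG_le p _
      have hsfx := pvG_suffix p (p.take k ++ [c])
      rw [hj, pvTake_suffix_concat_iff p _ c j (by omega)] at hsfx
      obtain ⟨h1, h2⟩ := hsfx
      have hjk : j ≤ k := by
        by_contra hlt
        have : p.take j <:+ p.take k → (p.take j).length ≤ (p.take k).length :=
          fun h => h.length_le
        have := h1.length_le
        simp [List.length_take] at this
        omega
      have hjne : j ≠ k := fun h => hc (h ▸ h2)
      have hjb : j ≤ pvBrd p k := pvBrd_max p (by omega) h1
      have h3 : p.take j <:+ p.take (pvBrd p k) :=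
        pvTake_suffix_take hjb (by have := pvBrd_le p k; omega) h1 (pvBrd_suffix p k)
      have h4 : p.take (j+1) <:+ p.take (pvBrd p k) ++ [c] := by
        rw [pvTake_suffix_concat_iff p _ c j (by omega)]
        exact ⟨h3, h2⟩
      rw [hj]
      exact pvG_max p _ hle h4
  · rcases Nat.eq_zero_or_pos (pvG p (p.take (pvBrd p k) ++ [c])) with h0 | hpos
    · omega
    · obtain ⟨j, hj⟩ : ∃ j, pvG p (p.take (pvBrd p k) ++ [c]) = j + 1 := ⟨pvG p (p.take (pvBrd p k) ++ [c]) - 1, by omega⟩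
      have hle : j + 1 ≤ p.length := hj ▸ pvG_le p _
      have hsfx := pvG_suffix p (p.take (pvBrd p k) ++ [c])
      rw [hj, pvTake_suffix_concat_iff p _ c j (by omega)] at hsfx
      obtain ⟨h1, h2⟩ := hsfx
      have h3 : p.take j <:+ p.take k := h1.trans (pvBrd_suffix p k)
      have h4 : p.take (j+1) <:+ p.take k ++ [c] := by
        rw [pvTake_suffix_concat_iff p _ c j (by omega)]
        exact ⟨h3, h2⟩
      rw [hj]
      exact pvG_max p _ hle h4

-- one automaton step is correct, assuming the failure entries below k are correct
theorem pvStep_eq (p : List Char) (fail : List Nat) (c : Char) (k : Nat)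
    (hk : k < p.length) (hf : ∀ j, j < k → fail.getD j 0 = pvBrd p (j+1)) :
    pvStep p fail k c = pvG p (p.take k ++ [c]) := by
  induction k using Nat.strong_induction_on generalizing c with
  | _ k ih =>
    by_cases hc : p.getD k ' ' = c
    · have hsh : pvShift p fail c k k = k := by
        cases k with
        | zero => rfl
        | succ k' =>
          rw [pvShift, if_neg]
          simp only [List.getD] at hc
          simp [hc]
      have hTk : p.take (k+1) = p.take k ++ [c] := by
        rw [pvTake_succ_concat p k hk, hc]
      simp only [pvStep, hsh, if_pos hc]
      apply le_antisymm
      · exact pvG_max p _ (by omega) (by rw [← hTk])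
      · have h1 := pvG_le_len p (p.take k ++ [c])
        simp [List.length_take] at h1
        omega
    · by_cases hk0 : k = 0
      · subst hk0
        have hsh : pvShift p fail c 0 0 = 0 := rfl
        simp only [pvStep, hsh, if_neg hc]
        symm
        simp only [pvG, List.take_zero, List.nil_append]
        rw [Nat.findGreatest_eq_zero_iff]
        intro n hn hnle hsfx
        obtain ⟨j, rfl⟩ : ∃ j, n = j + 1 := ⟨n - 1, by omega⟩
        rw [show ([c] : List Char) = [] ++ [c] by simp,
          pvTake_suffix_concat_iff p [] c j (by omega)] at hsfx
        obtain ⟨h1, h2⟩ := hsfx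
        have hj0 : j = 0 := by
          have h5 := List.suffix_nil.mp h1
          rw [List.take_eq_nil_iff] at h5
          rcases h5 with h5 | h5
          · exact h5
          · exact absurd (by simp [h5] : p.length = 0) (by omega)
        exact hc (hj0 ▸ h2)
      · have hb_eq : fail.getD (k-1) 0 = pvBrd p k := by
          have := hf (k-1) (by omega)
          rwa [show k - 1 + 1 = k by omega] at this
        have hble : fail.getD (k-1) 0 ≤ k - 1 := by
          rw [hb_eq]
          exact pvBrd_le p k
        have hsh : pvShift p fail c k k =
            pvShift p fail c (fail.getD (k-1) 0) (fail.getD (k-1) 0) := by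
          obtain ⟨k', rfl⟩ : ∃ k', k = k' + 1 := ⟨k - 1, by omega⟩
          rw [pvShift, if_pos ⟨by omega, hc⟩]
          apply pvShift_fuel p fail c _ k' _ (by simpa using hble) le_rfl
          intro j hj
          have := hf j (by omega)
          rw [this]
          have := pvBrd_le p (j+1)
          omega
        have hstep : pvStep p fail k c = pvStep p fail (fail.getD (k-1) 0) c := by
          simp only [pvStep, hsh]
        rw [hstep, ih (fail.getD (k-1) 0) (by omega) c (by omega)
          (fun j hj => hf j (by omega)), hb_eq, ← pvG_concat_brd p c k hk hc]

-- transition factorization for the failure-function builder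
theorem pvBrd_succ (p : List Char) (i : Nat) (h1 : 1 ≤ i) (hi : i < p.length) :
    pvBrd p (i+1) = pvG p (p.take (pvBrd p i) ++ [p.getD i ' ']) := by
  have hTk : p.take (i+1) = p.take i ++ [p.getD i ' '] := pvTake_succ_concat p i hi
  have hble : pvBrd p i ≤ i - 1 := pvBrd_le p i
  apply le_antisymm
  · have hvle : pvBrd p (i+1) ≤ i := by have := pvBrd_le p (i+1); omega
    rcases Nat.eq_zero_or_pos (pvBrd p (i+1)) with h0 | hpos
    · omega
    · obtain ⟨j, hj⟩ : ∃ j, pvBrd p (i+1) = j + 1 := ⟨pvBrd p (i+1) - 1, by omega⟩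
      have hsfx := pvBrd_suffix p (i+1)
      rw [hj, hTk, pvTake_suffix_concat_iff p (p.take i) _ j (by omega)] at hsfx
      obtain ⟨hA, hB⟩ := hsfx
      have hjb : j ≤ pvBrd p i := pvBrd_max p (by omega) hA
      have h3 : p.take j <:+ p.take (pvBrd p i) :=
        pvTake_suffix_take hjb (by omega) hA (pvBrd_suffix p i)
      have h4 : p.take (j+1) <:+ p.take (pvBrd p i) ++ [p.getD i ' '] := by
        rw [pvTake_suffix_concat_iff p _ _ j (by omega)]
        exact ⟨h3, hB⟩
      rw [hj]
      exact pvG_max p _ (by omega) h4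
  · have hwle : pvG p (p.take (pvBrd p i) ++ [p.getD i ' ']) ≤ pvBrd p i + 1 := by
      have := pvG_le_len p (p.take (pvBrd p i) ++ [p.getD i ' '])
      simp only [List.length_append, List.length_take, List.length_cons,
        List.length_nil] at this
      omega
    rcases Nat.eq_zero_or_pos (pvG p (p.take (pvBrd p i) ++ [p.getD i ' '])) with h0 | hpos
    · omega
    · obtain ⟨j, hj⟩ : ∃ j, pvG p (p.take (pvBrd p i) ++ [p.getD i ' ']) = j + 1 :=
        ⟨pvG p (p.take (pvBrd p i) ++ [p.getD i ' ']) - 1, by omega⟩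
      have hsfx := pvG_suffix p (p.take (pvBrd p i) ++ [p.getD i ' '])
      rw [hj, pvTake_suffix_concat_iff p _ _ j (by omega)] at hsfx
      obtain ⟨hA, hB⟩ := hsfx
      have h3 : p.take j <:+ p.take i := hA.trans (pvBrd_suffix p i)
      have h4 : p.take (j+1) <:+ p.take (i+1) := by
        rw [hTk, pvTake_suffix_concat_iff p _ _ j (by omega)]
        exact ⟨h3, hB⟩
      rw [hj]
      exact pvBrd_max p (by omega) h4

theorem pvFailLoop_inv (p : List Char) : ∀ (n : Nat) (fail : List Nat) (i : Nat),
    1 ≤ i → i ≤ p.length → p.length - i ≤ n → fail.length = i →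
    (∀ j, j < i → fail.getD j 0 = pvBrd p (j+1)) →
    ∀ j, j < p.length → (pvFailLoop p fail (pvBrd p i) i).getD j 0 = pvBrd p (j+1) := by
  intro n
  induction n with
  | zero =>
    intro fail i h1 hi hle hlen hf j hj
    rw [pvFailLoop, dif_neg (by omega)]
    exact hf j (by omega)
  | succ n ihn =>
    intro fail i h1 hi hle hlen hf j hj
    by_cases hlt : i < p.length
    · have hbrd_lt : pvBrd p i < p.length := by have := pvBrd_le p i; omega
      have hstep : pvStep p fail (pvBrd p i) (p.getD i ' ') = pvBrd p (i+1) := by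
        rw [pvStep_eq p fail (p.getD i ' ') (pvBrd p i) hbrd_lt
          (fun j hj => hf j (by have := pvBrd_le p i; omega)),
          ← pvBrd_succ p i h1 hlt]
      rw [pvFailLoop, dif_pos hlt]
      simp only [hstep]
      apply ihn (fail ++ [pvBrd p (i+1)]) (i+1) (by omega) (by omega) (by omega)
        (by simp [hlen]) _ j hj
      intro j' hj'
      rcases Nat.lt_or_ge j' i with h | h
      · rw [List.getD_append _ _ _ j' (by omega)]
        exact hf j' h
      · have hj'i : j' = i := by omega
        subst hj'i
        rw [List.getD_append_right _ _ _ _ (by omega), hlen]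
        simp
    · rw [pvFailLoop, dif_neg hlt]
      exact hf j (by omega)

theorem pvInfix_concat_iff (p t : List Char) (c : Char) :
    p <:+: t ++ [c] ↔ (p <:+: t ∨ p <:+ t ++ [c]) := by
  rw [← List.reverse_infix]
  simp only [List.reverse_append, List.reverse_cons, List.reverse_nil, List.nil_append,
    List.singleton_append]
  rw [List.infix_cons_iff]
  constructor
  · rintro (h | h)
    · right
      rw [← List.reverse_prefix]
      simpa using h
    · left
      rwa [List.reverse_infix] at h
  · rintro (h | h)
    · right
      rwa [List.reverse_infix]
    · left
      rw [← List.reverse_prefix] at h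
      simpa using h

theorem pvScanLoop_inv (p : List Char) (fail : List Nat) (t0 t : List Char)
    (_hp : p ≠ []) (hf : ∀ j, j < p.length → fail.getD j 0 = pvBrd p (j+1))
    (hs : pvG p t0 < p.length) (hni : ¬ p <:+: t0) :
    pvScanLoop p fail (pvG p t0) t =
      (if p <:+: (t0 ++ t) then none else some (pvG p (t0 ++ t))) := by
  induction t generalizing t0 with
  | nil => simp [pvScanLoop, hni]
  | cons c rest ih =>
    have hstep : pvStep p fail (pvG p t0) c = pvG p (t0 ++ [c]) := by
      rw [pvStep_eq p fail c (pvG p t0) hs (fun j hj => hf j (by omega)), ← pvG_concat]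
    rw [pvScanLoop]
    simp only [hstep]
    by_cases hfull : pvG p (t0 ++ [c]) = p.length
    · rw [if_pos hfull]
      have hsfx : p <:+ t0 ++ [c] := by
        have := pvG_suffix p (t0 ++ [c])
        rwa [hfull, List.take_length] at this
      have hinf : p <:+: t0 ++ c :: rest := by
        have h1 : p <:+: t0 ++ [c] := hsfx.isInfix
        have h2 : t0 ++ [c] <+: t0 ++ c :: rest := ⟨rest, by simp⟩
        exact h1.trans h2.isInfix
      rw [if_pos hinf]
    · rw [if_neg hfull]
      have hni' : ¬ p <:+: t0 ++ [c] := by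
        rw [pvInfix_concat_iff]
        rintro (h | h)
        · exact hni h
        · apply hfull
          have hple : p.length ≤ (t0 ++ [c]).length := h.length_le
          have := pvG_max p (t0 ++ [c]) le_rfl (by rw [List.take_length]; exact h)
          have := pvG_le p (t0 ++ [c])
          omega
      have := ih (t0 ++ [c]) (by have := pvG_le p (t0 ++ [c]); omega) hni'
      rw [this]
      simp

-- B computes pvSpec
theorem pvAlt_eq (existing incoming : String) :
    (novel_suffix_py_alt existing incoming).toList = pvSpec incoming.toList existing.toList := by
  unfold novel_suffix_py_alt
  by_cases hlen : PySem.Str.len incoming = 0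
  · have hnil : incoming.toList = [] := by
      rw [PySem.Str.len_eq] at hlen
      exact List.length_eq_zero_iff.mp (by exact_mod_cast hlen)
    rw [if_pos hlen]
    simp [pvSpec, hnil]
  · have hp : incoming.toList ≠ [] := by
      rw [PySem.Str.len_eq] at hlen
      intro h
      exact hlen (by simp [h])
    have hplen : 0 < incoming.toList.length := List.length_pos_iff.mpr hp
    rw [if_neg hlen]
    have h0 : pvBrd incoming.toList 1 = 0 := by simp [pvBrd]
    have hfail : ∀ j, j < incoming.toList.length →
        (pvFailLoop incoming.toList [0] 0 1).getD j 0 = pvBrd incoming.toList (j+1) := by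
      have := pvFailLoop_inv incoming.toList incoming.toList.length [0] 1 le_rfl
        (by omega) (by omega) (by simp) ?_
      · rwa [h0] at this
      · intro j hj
        have hj0 : j = 0 := by omega
        subst hj0
        simp [h0]
    have hG0 : pvG incoming.toList [] = 0 := Nat.le_zero.mp (pvG_le_len incoming.toList [])
    have hscan := pvScanLoop_inv incoming.toList (pvFailLoop incoming.toList [0] 0 1)
      [] existing.toList hp hfail (by rw [hG0]; omega)
      (by rw [List.infix_nil]; exact hp)
    rw [hG0] at hscan
    simp only [List.nil_append] at hscan
    show (match pvScanLoop incoming.toList (pvFailLoop incoming.toList [0] 0 1) 0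
        existing.toList with
      | none => ""
      | some st => PySem.Str.slice incoming (some ((st : Nat) : Int)) none).toList =
      pvSpec incoming.toList existing.toList
    rw [hscan]
    by_cases hinf : incoming.toList <:+: existing.toList
    · rw [if_pos hinf]
      simp [pvSpec, hp, hinf]
    · rw [if_neg hinf]
      simp [pvSpec, hp, hinf, PySem.Str.toList_slice, PySem.Chars.slice_eq_listSlice,
        PySem.List.slice_from_natCast]

-- A's countdown loop finds the greatest feasible overlap
theorem pvALoop_eq (existing incoming : String) (n : Nat) :
    (pvALoop existing incoming n).toList =
      incoming.toList.drop (Nat.findGreatest (fun j => incoming.toList.take j <:+ existing.toList) n) := by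
  induction n with
  | zero => simp [pvALoop]
  | succ n ih =>
    have hcond : (PySem.Str.endswith existing
        (PySem.Str.slice incoming none (some ((n+1 : Nat) : Int))) = true) ↔
        incoming.toList.take (n+1) <:+ existing.toList := by
      rw [PySem.Str.endswith_eq, PySem.Chars.endswith_iff, PySem.Str.toList_slice,
        PySem.Chars.slice_eq_listSlice, PySem.List.slice_to_natCast]
    rw [pvALoop, Nat.findGreatest_succ]
    by_cases h : incoming.toList.take (n+1) <:+ existing.toList
    · rw [if_pos (hcond.mpr h), if_pos h, PySem.Str.toList_slice,
        PySem.Chars.slice_eq_listSlice, PySem.List.slice_from_natCast]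
    · rw [if_neg (fun hc => h (hcond.mp hc)), if_neg h]
      exact ih

-- A computes pvSpec
theorem pvA_eq (existing incoming : String) :
    (novel_suffix_py existing incoming).toList = pvSpec incoming.toList existing.toList := by
  unfold novel_suffix_py
  by_cases h1 : PySem.Str.len incoming = 0
  · have hnil : incoming.toList = [] := by
      rw [PySem.Str.len_eq] at h1
      exact List.length_eq_zero_iff.mp (by exact_mod_cast h1)
    rw [if_pos h1]
    simp [pvSpec, hnil]
  · have hp : incoming.toList ≠ [] := by
      rw [PySem.Str.len_eq] at h1
      intro h
      exact h1 (by simp [h])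
    rw [if_neg h1]
    by_cases h2 : PySem.Str.len existing = 0
    · have htnil : existing.toList = [] := by
        rw [PySem.Str.len_eq] at h2
        exact List.length_eq_zero_iff.mp (by exact_mod_cast h2)
      rw [if_pos h2]
      have hG0 : pvG incoming.toList [] = 0 :=
        Nat.le_zero.mp (pvG_le_len incoming.toList [])
      simp [pvSpec, hp, htnil, List.infix_nil, hG0]
    · rw [if_neg h2]
      by_cases h3 : (PySem.Str.isIn incoming existing || PySem.Str.endswith existing incoming) = true
      · rw [if_pos h3]
        have hinf : incoming.toList <:+: existing.toList := by
          rcases Bool.or_eq_true_iff.mp h3 with h | h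
          · rw [PySem.Str.isIn_eq, PySem.Chars.isIn_iff_infix] at h
            exact h
          · rw [PySem.Str.endswith_eq, PySem.Chars.endswith_iff] at h
            exact h.isInfix
        simp [pvSpec, hp, hinf]
      · rw [if_neg h3]
        have hninf : ¬ incoming.toList <:+: existing.toList := by
          intro hinf
          apply h3
          rw [Bool.or_eq_true_iff]
          left
          rw [PySem.Str.isIn_eq, PySem.Chars.isIn_iff_infix]
          exact hinf
        by_cases h4 : PySem.Str.startswith incoming existing = true
        · rw [if_pos h4]
          rw [PySem.Str.startswith_eq, PySem.Chars.startswith_iff] at h4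
          have htake : existing.toList = incoming.toList.take existing.toList.length :=
            List.prefix_iff_eq_take.mp h4
          have hGt : pvG incoming.toList existing.toList = existing.toList.length := by
            apply le_antisymm (pvG_le_len _ _)
            exact pvG_max _ _ h4.length_le (by rw [← htake])
          rw [PySem.Str.len_eq, PySem.Str.toList_slice, PySem.Chars.slice_eq_listSlice,
            PySem.List.slice_from_natCast]
          simp [pvSpec, hp, hninf, hGt]
        · rw [if_neg h4, pvALoop_eq]
          have hmin : (min (PySem.Str.len existing) (PySem.Str.len incoming)).toNat =
              min existing.toList.length incoming.toList.length := by
            rw [PySem.Str.len_eq, PySem.Str.len_eq]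
            omega
          have hbnd : Nat.findGreatest (fun j => incoming.toList.take j <:+ existing.toList)
              (min existing.toList.length incoming.toList.length) =
              pvG incoming.toList existing.toList := by
            apply le_antisymm
            · exact Nat.findGreatest_mono (fun _ h => h) (Nat.min_le_right _ _)
            · exact Nat.le_findGreatest
                (le_min (pvG_le_len _ _) (pvG_le _ _)) (pvG_suffix _ _)
          rw [hmin, hbnd]
          simp [pvSpec, hp, hninf]

-- ===== VERDICT (by name: the statement is the Claim_ definition above) =====
theorem novel_suffix_py_spec : Claim_equal_novel_suffix_py := by
  intro existing incoming _
  unfold Spec_novel_suffix_py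
  apply String.toList_inj.mp
  rw [pvA_eq, pvAlt_eq]
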